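-- pv_equiv track=rewrite | github.com/clee421/advent-of-code | 2025/day12/run.py | can_fit_region
-- ===== SOURCE A (Python) =====
-- from typing import Dict, List, Tuple
--
-- def shape_stats(shape: List[str]) -> Tuple[int, int, int]:
--     height = len(shape)
--     width = max(len(row) for row in shape) if shape else 0
--     area = sum(ch == "#" for row in shape for ch in row)
--     return width, height, area
--
-- def can_fit_region(shapes: Dict[str, List[str]], region: Tuple[Tuple[int, int], List[int]]) -> bool:
--     (width, height), counts = region
--
--     region_area = width * height
--     total_shape_area = 0
--     total_bound_box_area = 0
--
--     for i, count in enumerate(counts):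
--         if count == 0:
--             continue
--         s = shapes[i]
--         shape_width, shape_height, shape_area = shape_stats(s)
--
--         if shape_width > width or shape_height > height:
--             return False
--
--         total_shape_area += shape_area * count
--         total_bound_box_area += (shape_width * shape_height) * count
--
--     if total_shape_area > region_area:
--         return False
--
--     if total_bound_box_area > region_area:
--         return False
--
--     return True
-- ===== SOURCE B (Python) =====
-- def can_fit_region(shapes, region):
--     # Divide-and-conquer tree reduction over counts[lo:hi]: each leaf yields that
--     # shape's (filled, bounding-box) contribution or None if it does not fit; halves
--     # are combined by pair addition with None propagation (left half first, so a
--     # failure fires at the same position as a sequential scan).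
--     (width, height), counts = region
--
--     def totals(lo, hi):
--         if hi - lo == 0:
--             return (0, 0)
--         if hi - lo == 1:
--             c = counts[lo]
--             if c == 0:
--                 return (0, 0)
--             s = shapes[lo]
--             w = max((len(row) for row in s), default=0)
--             h = len(s)
--             if w > width or h > height:
--                 return None
--             a = sum(row.count("#") for row in s)
--             return (a * c, w * h * c)
--         mid = (lo + hi) // 2
--         left = totals(lo, mid)
--         if left is None:
--             return None
--         right = totals(mid, hi)
--         if right is None:
--             return None
--         return (left[0] + right[0], left[1] + right[1])
--
--     t = totals(0, len(counts))
--     if t is None: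
--         return False
--     area = width * height
--     return t[0] <= area and t[1] <= area
-- ===== Notes on version B (the rewrite author's own statement) =====
-- stated objective: alternative
-- what changed: A is a fused sequential loop threading two running totals with early returns and a shape_stats helper; B is a divide-and-conquer tree reduction over index ranges of counts: a leaf yields one shape's (filled, bounding-box) contribution or None on a misfit, halves are combined left-first by pair addition with None propagation, and the root totals are checked against the region area.
import Mathlib
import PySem

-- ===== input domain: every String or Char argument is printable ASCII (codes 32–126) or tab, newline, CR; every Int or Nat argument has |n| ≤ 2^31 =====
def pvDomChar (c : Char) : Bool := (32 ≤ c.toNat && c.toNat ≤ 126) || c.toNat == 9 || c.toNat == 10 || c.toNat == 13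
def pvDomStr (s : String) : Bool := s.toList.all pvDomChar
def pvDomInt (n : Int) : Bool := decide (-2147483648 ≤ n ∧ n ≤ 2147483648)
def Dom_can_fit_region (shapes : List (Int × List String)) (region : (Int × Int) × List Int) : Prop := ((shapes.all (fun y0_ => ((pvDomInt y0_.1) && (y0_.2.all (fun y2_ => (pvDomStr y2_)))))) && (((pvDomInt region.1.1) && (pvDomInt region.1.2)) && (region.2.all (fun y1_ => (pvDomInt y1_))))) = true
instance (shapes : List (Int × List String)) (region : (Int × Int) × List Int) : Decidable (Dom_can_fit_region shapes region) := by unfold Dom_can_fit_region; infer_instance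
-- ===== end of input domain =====

-- B replaces A's fused sequential accumulator loop by a divide-and-conquer tree reduction
-- over index ranges (leaf = one shape's contribution or a failure, halves combined by pair
-- addition with failure propagation, left half first); same cost, different algorithm.

-- ===== PORT A =====
-- shape_stats of A: (width, height, area); area by the nested 0/1 sum over rows and chars.
def pvShapeStatsA (shape : List String) : Int × Int × Int :=
  let height : Int := (shape.length : Int)
  let width : Int :=
    match PySem.List.max? (shape.map (fun row => PySem.Str.len row)) (fun x => x) with
    | some w => w
    | none => 0
  let area : Int :=
    shape.foldl (fun acc row =>
      row.toList.foldl (fun acc2 ch => acc2 + (if ch == '#' then 1 else 0)) acc) 0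
  (width, height, area)

-- A's for-loop with its two running totals and early 'return False'; the trailing
-- area checks are the base case.  'shapes[i]' is first-match association-list lookup;
-- a missing key is a Python KeyError, excluded by Pre_ (the .getD [] default is never
-- reached inside Pre_).
def pvLoopA (shapes : List (Int × List String)) (width height region_area : Int) :
    List (Int × Int) → Int → Int → Bool
  | [], tsa, tbba =>
      if tsa > region_area then false
      else if tbba > region_area then false
      else true
  | (i, count) :: rest, tsa, tbba =>
      if count = 0 then pvLoopA shapes width height region_area rest tsa tbba
      else
        let s := (List.lookup i shapes).getD []
        let st := pvShapeStatsA s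
        if st.1 > width || st.2.1 > height then false
        else pvLoopA shapes width height region_area rest
          (tsa + st.2.2 * count) (tbba + st.1 * st.2.1 * count)

def can_fit_region (shapes : List (Int × List String)) (region : (Int × Int) × List Int) : Bool :=
  let width := region.1.1
  let height := region.1.2
  let counts := region.2
  pvLoopA shapes width height (width * height) (PySem.List.enumerate counts 0) 0 0

-- ===== PORT B =====
-- B's max((len(row) for row in s), default=0).
def pvBW (s : List String) : Int :=
  PySem.List.maxD (s.map (fun row => PySem.Str.len row)) (fun x => x) 0

-- B's recursive totals(lo, hi) over counts[lo:hi]: (filled, boxed) or None on a misfit.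
-- lo and hi are the Python ints 0 ≤ lo ≤ hi ≤ len(counts), kept as Nat; every call has
-- lo < len(counts) at the leaf, so counts[lo] is the in-range counts.getD lo 0, and
-- (lo+hi)//2 on nonnegatives is Nat division.  shapes[lo] as in port A (Pre_ covers it).
def pvTotB (shapes : List (Int × List String)) (width height : Int) (counts : List Int) :
    (lo hi : Nat) → Option (Int × Int)
  | lo, hi =>
    if _h0 : hi - lo = 0 then some (0, 0)
    else if _h1 : hi - lo = 1 then
      let c := counts.getD lo 0
      if c = 0 then some (0, 0)
      else
        let s := (List.lookup (lo : Int) shapes).getD []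
        let w := pvBW s
        let h : Int := (s.length : Int)
        if w > width || h > height then none
        else
          let a := (s.map (fun row => (row.toList.count '#' : Int))).sum
          some (a * c, w * h * c)
    else
      let mid := (lo + hi) / 2
      match pvTotB shapes width height counts lo mid with
      | none => none
      | some l =>
        match pvTotB shapes width height counts mid hi with
        | none => none
        | some r => some (l.1 + r.1, l.2 + r.2)
  termination_by lo hi => hi - lo
  decreasing_by all_goals omega

def can_fit_region_alt (shapes : List (Int × List String)) (region : (Int × Int) × List Int) : Bool :=
  let width := region.1.1
  let height := region.1.2
  let counts := region.2
  match pvTotB shapes width height counts 0 counts.length with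
  | none => false
  | some t =>
      let area := width * height
      decide (t.1 ≤ area) && decide (t.2 ≤ area)

-- ===== PRECONDITION & SPEC =====
-- Pre_ helper: the shape's bounding box fits in the region (row lengths are ≥ 0, so the
-- running max from 0 is Python's max of the row lengths, 0 for an empty shape).
def pvShapeFits (shape : List String) (width height : Int) : Bool :=
  decide ((shape.map (fun row => PySem.Str.len row)).foldl max 0 ≤ width)
    && decide ((shape.length : Int) ≤ height)

-- Pre_ excludes exactly the inputs on which Python A raises KeyError: a nonzero count at an
-- index with no shape that is not preceded (in iteration order) by a nonzero count whose
-- missing-or-oversize shape already ends the computation first; B raises on the same inputs.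
def Pre_can_fit_region (shapes : List (Int × List String)) (region : (Int × Int) × List Int) : Prop :=
  ∀ k < region.2.length, (region.2.getD k 0 ≠ 0 ∧ List.lookup (k : Int) shapes = none) →
    ∃ j < k, region.2.getD j 0 ≠ 0 ∧
      ((List.lookup (j : Int) shapes).elim true
        (fun s => !pvShapeFits s region.1.1 region.1.2)) = true
instance (shapes : List (Int × List String)) (region : (Int × Int) × List Int) : Decidable (Pre_can_fit_region shapes region) := by unfold Pre_can_fit_region; infer_instance

def pvWitness_can_fit_region : (List (Int × List String)) × ((Int × Int) × List Int) :=
  ([(0, ["#."]), (1, ["#", "#"])], ((3, 3), [1, 2, 0]))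

def Spec_can_fit_region (shapes : List (Int × List String)) (region : (Int × Int) × List Int) (out : Bool) : Prop := out = can_fit_region_alt shapes region
instance (shapes : List (Int × List String)) (region : (Int × Int) × List Int) (out : Bool) : Decidable (Spec_can_fit_region shapes region out) := by unfold Spec_can_fit_region; infer_instance

-- ===== CLAIM (what is proved, stated in full; the proofs are below) =====
def Claim_equal_can_fit_region : Prop := ∀ (shapes : List (Int × List String)) (region : (Int × Int) × List Int), Dom_can_fit_region shapes region → Pre_can_fit_region shapes region → Spec_can_fit_region shapes region (can_fit_region shapes region)

-- ===== LEMMAS AND PROOFS =====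

-- One index/count pair's contribution: some (0,0) when skipped, none on a misfit.
def pvOne (shapes : List (Int × List String)) (width height : Int) (i c : Int) :
    Option (Int × Int) :=
  if c = 0 then some (0, 0)
  else
    let s := (List.lookup i shapes).getD []
    if pvBW s > width || (s.length : Int) > height then none
    else some ((s.map (fun row => (row.toList.count '#' : Int))).sum * c,
               pvBW s * (s.length : Int) * c)

-- Failure-propagating pairwise sum (associative, identity some (0,0)).
def pvComb : Option (Int × Int) → Option (Int × Int) → Option (Int × Int)
  | none, _ => none
  | some _, none => none
  | some l, some r => some (l.1 + r.1, l.2 + r.2)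

-- Sequential left-to-right combination, the common reference of both ports.
def pvSeq (shapes : List (Int × List String)) (width height : Int) :
    List (Int × Int) → Option (Int × Int)
  | [] => some (0, 0)
  | (i, c) :: rest => pvComb (pvOne shapes width height i c) (pvSeq shapes width height rest)

lemma pvComb_zero_left (x : Option (Int × Int)) : pvComb (some (0, 0)) x = x := by
  cases x <;> simp [pvComb]

lemma pvComb_zero_right (x : Option (Int × Int)) : pvComb x (some (0, 0)) = x := by
  cases x <;> simp [pvComb]

lemma pvComb_assoc (x y z : Option (Int × Int)) :
    pvComb (pvComb x y) z = pvComb x (pvComb y z) := by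
  cases x <;> cases y <;> cases z <;> simp [pvComb, add_assoc]

lemma pvSeq_append (shapes : List (Int × List String)) (width height : Int)
    (l1 l2 : List (Int × Int)) :
    pvSeq shapes width height (l1 ++ l2)
      = pvComb (pvSeq shapes width height l1) (pvSeq shapes width height l2) := by
  induction l1 with
  | nil => simp [pvSeq, pvComb_zero_left]
  | cons p rest ih =>
    obtain ⟨i, c⟩ := p
    simp [pvSeq, ih, pvComb_assoc]

-- A's 0/1 character sum over one row is a '#'-count.
lemma pvSumRow (cs : List Char) :
    (cs.map (fun ch => if ch == '#' then (1:Int) else 0)).sum = (cs.count '#' : Int) := by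
  rw [PySem.List.sum_map_ite_one_zero]
  simp [List.count]

-- A's nested area loop accumulates the per-row counts.
lemma pvAreaA (l : List String) (c : Int) :
    l.foldl (fun acc row =>
        row.toList.foldl (fun a2 ch => a2 + (if ch == '#' then 1 else 0)) acc) c
      = c + (l.map (fun row => (row.toList.count '#' : Int))).sum := by
  simp only [PySem.List.foldl_add, pvSumRow]

-- A's shape_stats in terms of B's pieces.
lemma pvStatsA_eq (s : List String) :
    pvShapeStatsA s = (pvBW s, (s.length : Int),
      (s.map (fun row => (row.toList.count '#' : Int))).sum) := by
  unfold pvShapeStatsA pvBW PySem.List.maxD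
  refine Prod.ext ?_ (Prod.ext rfl ?_)
  · cases PySem.List.max? (s.map (fun row => PySem.Str.len row)) (fun x => x) <;> rfl
  · simpa using pvAreaA s 0

-- A's fused loop is the sequential combination followed by the two threshold checks.
lemma pvLoopA_eq_seq (shapes : List (Int × List String)) (width height ra : Int) :
    ∀ (l : List (Int × Int)) (tsa tbba : Int),
      pvLoopA shapes width height ra l tsa tbba =
        match pvSeq shapes width height l with
        | none => false
        | some t => decide (tsa + t.1 ≤ ra) && decide (tbba + t.2 ≤ ra) := by
  intro l
  induction l with
  | nil =>
    intro tsa tbba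
    simp only [pvLoopA, pvSeq]
    split_ifs with h1 h2 <;> simp <;> omega
  | cons p rest ih =>
    intro tsa tbba
    obtain ⟨i, c⟩ := p
    simp only [pvLoopA, pvSeq, pvOne, pvStatsA_eq]
    by_cases hc : c = 0
    · simp only [hc, ite_true]
      rw [ih tsa tbba, pvComb_zero_left]
    · simp only [if_neg hc]
      set s := (List.lookup i shapes).getD [] with hs
      by_cases hover : (decide (pvBW s > width) || decide ((s.length : Int) > height)) = true
      · simp only [gt_iff_lt] at hover ⊢
        simp [hover, pvComb]
      · simp only [gt_iff_lt] at hover ⊢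
        simp only [hover, Bool.false_eq_true, if_false, ih]
        cases pvSeq shapes width height rest with
        | none => simp [pvComb]
        | some t =>
          simp only [pvComb]
          congr 2 <;> · congr 1; ring

-- B's tree reduction over [lo, hi) is the sequential combination of the same pairs.
lemma pvTotB_eq_seq (shapes : List (Int × List String)) (width height : Int)
    (counts : List Int) :
    ∀ (n lo hi : Nat), hi - lo ≤ n →
      pvTotB shapes width height counts lo hi =
        pvSeq shapes width height
          ((List.range' lo (hi - lo)).map (fun k : Nat => ((k : Int), counts.getD k 0))) := by
  intro n
  induction n with
  | zero =>
    intro lo hi hle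
    have h0 : hi - lo = 0 := by omega
    rw [pvTotB]
    simp [h0, pvSeq]
  | succ m ih =>
    intro lo hi hle
    rw [pvTotB]
    by_cases h0 : hi - lo = 0
    · simp [h0, pvSeq]
    · by_cases h1 : hi - lo = 1
      · have e : List.range' lo (hi - lo) = [lo] := by rw [h1]; rfl
        rw [e]
        simp only [List.map_cons, List.map_nil, pvSeq, pvComb_zero_right, pvOne, h1]
        norm_num
      · simp only [dif_neg h0, dif_neg h1]
        have hmlt : (lo + hi) / 2 - lo < hi - lo := by omega
        have hmgt : hi - (lo + hi) / 2 < hi - lo := by omega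
        have hlom : lo ≤ (lo + hi) / 2 := by omega
        have hmhi : (lo + hi) / 2 ≤ hi := by omega
        rw [ih lo ((lo + hi) / 2) (by omega), ih ((lo + hi) / 2) hi (by omega)]
        have hsplit : List.range' lo (hi - lo)
            = List.range' lo ((lo + hi) / 2 - lo) ++ List.range' ((lo + hi) / 2) (hi - (lo + hi) / 2) := by
          calc List.range' lo (hi - lo)
              = List.range' lo (((lo + hi) / 2 - lo) + (hi - (lo + hi) / 2)) := by
                rw [show hi - lo = ((lo + hi) / 2 - lo) + (hi - (lo + hi) / 2) from by omega]
            _ = List.range' lo ((lo + hi) / 2 - lo)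
                  ++ List.range' (lo + 1 * ((lo + hi) / 2 - lo)) (hi - (lo + hi) / 2) :=
                List.range'_append.symm
            _ = _ := by rw [show lo + 1 * ((lo + hi) / 2 - lo) = (lo + hi) / 2 from by omega]
        rw [hsplit, List.map_append, pvSeq_append]
        cases pvSeq shapes width height
            ((List.range' lo ((lo + hi) / 2 - lo)).map (fun k : Nat => ((k : Int), counts.getD k 0))) with
        | none => simp [pvComb]
        | some l =>
          cases pvSeq shapes width height
              ((List.range' ((lo + hi) / 2) (hi - (lo + hi) / 2)).map (fun k : Nat => ((k : Int), counts.getD k 0))) with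
          | none => simp [pvComb]
          | some r => simp [pvComb]

-- Python's enumerate(counts) as the Nat-indexed range map the B-side lemma speaks about.
lemma pvEnum_eq (counts : List Int) :
    ∀ (s : Nat), PySem.List.enumerate counts (s : Int)
      = (List.range' s counts.length).map (fun k : Nat => ((k : Int), counts.getD (k - s) 0)) := by
  induction counts with
  | nil => intro s; simp [PySem.List.enumerate_nil]
  | cons x xs ih =>
    intro s
    rw [PySem.List.enumerate_cons]
    have : ((s : Int) + 1) = (((s + 1 : Nat)) : Int) := by push_cast; ring
    rw [this, ih (s + 1)]
    simp only [List.length_cons, List.range'_succ, List.map_cons]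
    congr 1
    · simp
    · rw [List.map_congr_left]
      intro k hk
      obtain ⟨i2, _, hki⟩ := List.mem_range'.mp hk
      have hk' : s + 1 ≤ k := by omega
      have : k - s = (k - (s + 1)) + 1 := by omega
      simp [this]

-- ===== VERDICT (by name: the statement is the Claim_ definition above) =====
theorem can_fit_region_spec : Claim_equal_can_fit_region := by
  intro shapes region _dom _pre
  unfold Spec_can_fit_region can_fit_region can_fit_region_alt
  have he : PySem.List.enumerate region.2 0
      = (List.range' 0 region.2.length).map (fun k : Nat => ((k : Int), region.2.getD k 0)) := by
    have := pvEnum_eq region.2 0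
    simpa using this
  rw [pvLoopA_eq_seq, he, ← Nat.sub_zero region.2.length,
    ← pvTotB_eq_seq shapes region.1.1 region.1.2 region.2 region.2.length 0 region.2.length
      (by omega)]
  cases h : pvTotB shapes region.1.1 region.1.2 region.2 0 region.2.length <;> simp [h]
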